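-- pv_equiv track=rewrite | github.com/StartDeveloperKim/TIL | 프로그래머스Lv2/귤 고르기.py | solution
-- ===== SOURCE A (Python) =====
-- def solution(k, tangerine):
--     answer = 0
--     tangerineDic={}
--     for t in tangerine:
--         if t in tangerineDic.keys(): tangerineDic[t]+=1
--         else: tangerineDic[t]=1
--
--     box=[]
--     for key, v in tangerineDic.items():
--         box.append([key, v])
--     box.sort(key=lambda x:x[1], reverse=True)
--
--     total=0
--     for b in box:
--         total+=b[1]
--         answer+=1
--         if total>=k:
--             break
--     return answer
-- ===== SOURCE B (Python) =====
-- def solution(k, tangerine):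
--     cnt = {}
--     for t in tangerine:
--         cnt[t] = cnt.get(t, 0) + 1
--     hist = {}
--     maxf = 0
--     for f in cnt.values():
--         hist[f] = hist.get(f, 0) + 1
--         if f > maxf:
--             maxf = f
--     answer = 0
--     total = 0
--     for f in range(maxf, 0, -1):
--         for _ in range(hist.get(f, 0)):
--             total += f
--             answer += 1
--             if total >= k:
--                 return answer
--     return answer
-- ===== Notes on version B (the rewrite author's own statement) =====
-- stated objective: faster
-- what changed: Replaces sorting the (type, count) table in descending order with a counting pass: build a histogram of frequency values plus the maximal frequency, then scan buckets from the maximal frequency down, taking one type per step until the running total reaches k.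
import Mathlib
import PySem

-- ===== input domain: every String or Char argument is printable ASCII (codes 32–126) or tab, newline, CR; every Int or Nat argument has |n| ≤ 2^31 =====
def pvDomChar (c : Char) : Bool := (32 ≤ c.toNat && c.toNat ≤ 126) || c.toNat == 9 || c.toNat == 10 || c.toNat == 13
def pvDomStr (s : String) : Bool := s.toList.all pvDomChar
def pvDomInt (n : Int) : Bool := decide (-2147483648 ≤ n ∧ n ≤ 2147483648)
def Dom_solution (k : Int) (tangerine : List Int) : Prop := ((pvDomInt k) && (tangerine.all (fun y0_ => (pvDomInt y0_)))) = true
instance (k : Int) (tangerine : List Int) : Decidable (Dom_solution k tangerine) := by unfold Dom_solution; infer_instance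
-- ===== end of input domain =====

-- B replaces A's descending sort of the frequency table by a counting pass over a
-- frequency histogram (bucket scan from the maximal frequency down); measurably faster.


-- ===== PORT A =====
-- 'for b in box: total+=b[1]; answer+=1; if total>=k: break' — break modelled by
-- returning the incremented answer as soon as the test fires
def pvBuyLoopA (k : Int) : List (Int × Int) → Int → Int → Int
  | [], answer, _ => answer
  | b :: rest, answer, total =>
    if total + b.2 ≥ k then answer + 1
    else pvBuyLoopA k rest (answer + 1) (total + b.2)

def solution (k : Int) (tangerine : List Int) : Int :=
  let tangerineDic := tangerine.foldl
    (fun d t => if d.contains t then d.modify t 0 (· + 1) else d.insert t 1)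
    (PySem.Dict.empty : PySem.Dict Int Int)
  let box := tangerineDic.items.foldl (fun b kv => b ++ [(kv.1, kv.2)]) []
  let box := PySem.List.sorted box (fun x => x.2) true
  pvBuyLoopA k box 0 0

-- ===== PORT B =====
-- inner 'for _ in range(hist.get(f, 0))': some = early return, none = loop finished
def pvInnerB (k f : Int) : Nat → Int → Int → Option Int × Int × Int
  | 0, answer, total => (none, answer, total)
  | n + 1, answer, total =>
    if total + f ≥ k then (some (answer + 1), answer + 1, total + f)
    else pvInnerB k f n (answer + 1) (total + f)

def pvOuterB (k : Int) (hist : PySem.Dict Int Int) : List Int → Int → Int → Int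
  | [], answer, _ => answer
  | f :: rest, answer, total =>
    match pvInnerB k f (hist.getD f 0).toNat answer total with
    | (some ans, _, _) => ans
    | (none, answer', total') => pvOuterB k hist rest answer' total'

def solution_alt (k : Int) (tangerine : List Int) : Int :=
  let cnt := tangerine.foldl (fun d t => d.insert t (d.getD t 0 + 1))
    (PySem.Dict.empty : PySem.Dict Int Int)
  let hm := cnt.values.foldl
    (fun (p : PySem.Dict Int Int × Int) f =>
      (p.1.insert f (p.1.getD f 0 + 1), if f > p.2 then f else p.2))
    ((PySem.Dict.empty : PySem.Dict Int Int), 0)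
  pvOuterB k hm.1 (PySem.List.pyRange hm.2 0 (-1)) 0 0

-- ===== PRECONDITION & SPEC =====
def Spec_solution (k : Int) (tangerine : List Int) (out : Int) : Prop := out = solution_alt k tangerine
instance (k : Int) (tangerine : List Int) (out : Int) : Decidable (Spec_solution k tangerine out) := by unfold Spec_solution; infer_instance

-- ===== CLAIM (what is proved, stated in full; the proofs are below) =====
def Claim_equal_solution : Prop := ∀ (k : Int) (tangerine : List Int), Dom_solution k tangerine → Spec_solution k tangerine (solution k tangerine)

-- ===== LEMMAS AND PROOFS =====

-- both loops are the same greedy walk over a list of frequencies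
def pvGreedy (k : Int) : List Int → Int → Int → Int
  | [], a, _ => a
  | f :: rest, a, t => if t + f ≥ k then a + 1 else pvGreedy k rest (a + 1) (t + f)

theorem pvBuyLoopA_eq_greedy (k : Int) (bs : List (Int × Int)) (a t : Int) :
    pvBuyLoopA k bs a t = pvGreedy k (bs.map Prod.snd) a t := by
  induction bs generalizing a t with
  | nil => rfl
  | cons b rest ih => simp only [pvBuyLoopA, List.map_cons, pvGreedy]; split <;> simp [ih]

theorem pvInnerB_eq_greedy (k f : Int) (rest' : List Int) (n : Nat) (a t : Int) :
    (match pvInnerB k f n a t with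
      | (some ans, _, _) => ans
      | (none, a', t') => pvGreedy k rest' a' t') =
    pvGreedy k (List.replicate n f ++ rest') a t := by
  induction n generalizing a t with
  | zero => rfl
  | succ n ih =>
    rw [List.replicate_succ, List.cons_append]
    by_cases h : k ≤ t + f
    · simp [pvInnerB, pvGreedy, h]
    · simp [pvInnerB, pvGreedy, h, ih]

theorem pvOuterB_eq_greedy (k : Int) (hist : PySem.Dict Int Int) (fs : List Int) (a t : Int) :
    pvOuterB k hist fs a t =
      pvGreedy k (fs.flatMap fun f => List.replicate (hist.getD f 0).toNat f) a t := by
  induction fs generalizing a t with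
  | nil => rfl
  | cons f rest ih =>
    rw [List.flatMap_cons, ← pvInnerB_eq_greedy]
    simp only [pvOuterB]
    rcases h : pvInnerB k f (hist.getD f 0).toNat a t with ⟨o, a', t'⟩
    cases o <;> simp [ih]

-- descending pyRange: shape and membership
theorem pvPyRangeDesc (m : Nat) :
    (PySem.List.pyRange (m : Int) 0 (-1)).Pairwise (fun a b => b < a) ∧
    (∀ x, x ∈ PySem.List.pyRange (m : Int) 0 (-1) ↔ 1 ≤ x ∧ x ≤ (m : Int)) := by
  induction m with
  | zero =>
    rw [PySem.List.pyRange_neg_one_eq_nil (by norm_num)]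
    constructor
    · exact List.Pairwise.nil
    · intro x; simp; omega
  | succ m ih =>
    have hc : (0 : Int) < ((m + 1 : Nat) : Int) := by positivity
    rw [PySem.List.pyRange_neg_one_cons hc]
    have he : ((m + 1 : Nat) : Int) - 1 = (m : Int) := by push_cast; ring
    rw [he]
    constructor
    · exact List.pairwise_cons.mpr ⟨fun y hy => by have := (ih.2 y).mp hy; push_cast; omega, ih.1⟩
    · intro x
      rw [List.mem_cons, ih.2 x]
      push_cast
      omega

-- the bucket expansion is descending
theorem pvFlatPairwise (fs : List Int) (n : Int → Nat) (h : fs.Pairwise (fun a b => b < a)) :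
    (fs.flatMap fun f => List.replicate (n f) f).Pairwise (fun a b : Int => b ≤ a) := by
  rw [List.pairwise_flatMap]
  constructor
  · intro a _
    apply List.pairwise_iff_forall_sublist.mpr
    intro b c hbc
    have h1 : b = a := List.eq_of_mem_replicate (hbc.subset (by simp))
    have h2 : c = a := List.eq_of_mem_replicate (hbc.subset (by simp))
    omega
  · exact h.imp fun {a b} hab x hx y hy => by
      rw [List.eq_of_mem_replicate hx, List.eq_of_mem_replicate hy]; omega

-- count of an element in the bucket expansion
theorem pvCountFlat (fs : List Int) (n : Int → Nat) (h : fs.Nodup) (x : Int) :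
    (fs.flatMap fun f => List.replicate (n f) f).count x = if x ∈ fs then n x else 0 := by
  induction fs with
  | nil => simp
  | cons f rest ih =>
    rcases List.nodup_cons.mp h with ⟨hf, hr⟩
    rw [List.flatMap_cons, List.count_append, ih hr, List.count_replicate]
    by_cases hx : x = f
    · subst hx; simp [hf]
    · simp [hx, Ne.symm hx]

-- the two frequency sequences coincide
theorem pvListEq (tangerine : List Int) :
    ((PySem.List.sorted (PySem.Dict.counter tangerine : PySem.Dict Int Int).items
        (fun x => x.2) true).map Prod.snd) =
    ((PySem.List.pyRange ((PySem.Dict.counter tangerine : PySem.Dict Int Int).values.foldl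
          (fun m f => if f > m then f else m) 0) 0 (-1)).flatMap
       fun f => List.replicate
         ((PySem.Dict.counter ((PySem.Dict.counter tangerine : PySem.Dict Int Int).values)).getD f 0).toNat f) := by
  have hnd : (PySem.Dict.counter tangerine : PySem.Dict Int Int).keys.Nodup :=
    PySem.Dict.nodup_keys_counter tangerine
  set vals := (PySem.Dict.counter tangerine : PySem.Dict Int Int).values with hv
  set maxf := vals.foldl (fun m f => if f > m then f else m) 0 with hm
  have hmax : maxf = vals.foldl max 0 := by
    rw [hm]
    apply PySem.List.foldl_congr_mem
    intro acc x _
    rw [max_def]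
    split_ifs <;> omega
  have h0m : (0 : Int) ≤ maxf := by rw [hmax]; exact (PySem.List.le_foldl_max vals 0).1
  have hvm : ∀ v ∈ vals, v ≤ maxf := by
    rw [hmax]; exact (PySem.List.le_foldl_max vals 0).2
  have h1 : ∀ v ∈ vals, 1 ≤ v := by
    intro v hv'
    rw [hv, PySem.Dict.values_eq_map_keys _ hnd 0] at hv'
    obtain ⟨key, hkmem, rfl⟩ := List.mem_map.mp hv'
    rw [PySem.Dict.getD_counter]
    have hkt : key ∈ tangerine := by
      rw [PySem.Dict.keys_counter] at hkmem
      exact (PySem.Set.mem_ofList tangerine key).mp hkmem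
    have := List.count_pos_iff.mpr hkt
    omega
  have hmt : ((maxf.toNat : Nat) : Int) = maxf := Int.toNat_of_nonneg h0m
  have hmem : ∀ x : Int, x ∈ PySem.List.pyRange maxf 0 (-1) ↔ 1 ≤ x ∧ x ≤ maxf := by
    intro x; rw [← hmt]; exact (pvPyRangeDesc maxf.toNat).2 x
  have hdesc : (PySem.List.pyRange maxf 0 (-1)).Pairwise (fun a b => b < a) := by
    rw [← hmt]; exact (pvPyRangeDesc maxf.toNat).1
  have hndfs : (PySem.List.pyRange maxf 0 (-1)).Nodup :=
    hdesc.imp fun {a b} hab => ne_of_gt hab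
  apply List.Perm.eq_of_pairwise (le := fun a b : Int => b ≤ a)
  · intro a b _ _ hab hba; omega
  · exact (PySem.List.sorted_pairwise_rev _ (fun x : Int × Int => x.2)).map Prod.snd
      (fun a b hab => hab)
  · exact pvFlatPairwise _ _ hdesc
  · -- Perm: both sides are permutations of vals
    have hA : ((PySem.List.sorted (PySem.Dict.counter tangerine : PySem.Dict Int Int).items
        (fun x => x.2) true).map Prod.snd).Perm vals := by
      rw [hv]
      exact (PySem.List.sorted_perm _ _ _).map Prod.snd
    have hB : vals.Perm
        ((PySem.List.pyRange maxf 0 (-1)).flatMap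
          fun f => List.replicate ((PySem.Dict.counter vals).getD f 0).toNat f) := by
      rw [List.perm_iff_count]
      intro x
      rw [pvCountFlat _ _ hndfs x]
      by_cases hx : x ∈ PySem.List.pyRange maxf 0 (-1)
      · rw [if_pos hx, PySem.Dict.getD_counter, Int.toNat_natCast]
      · rw [if_neg hx]
        rw [hmem] at hx
        apply List.count_eq_zero.mpr
        intro hxv
        exact hx ⟨h1 x hxv, hvm x hxv⟩
    exact hA.trans hB

-- A's dict loop builds Counter(tangerine)
theorem pvDicA (tangerine : List Int) :
    tangerine.foldl
      (fun d t => if d.contains t then d.modify t 0 (· + 1) else d.insert t 1)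
      (PySem.Dict.empty : PySem.Dict Int Int) = PySem.Dict.counter tangerine := by
  rw [PySem.Dict.counter_eq_foldl]
  apply PySem.List.foldl_congr_mem
  intro d t _
  by_cases h : d.contains t
  · simp [h]
  · have he : d.modify t 0 (· + 1) = d.insert t (d.getD t 0 + 1) := rfl
    have hg : d.getD t 0 = (0 : Int) := PySem.Dict.getD_of_not_contains d 0 (by simpa using h)
    simp [h, he, hg]

-- ===== VERDICT (by name: the statement is the Claim_ definition above) =====
theorem solution_spec : Claim_equal_solution := by
  intro k tangerine _
  show solution k tangerine = solution_alt k tangerine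
  unfold solution solution_alt
  simp only [pvDicA,
    PySem.List.foldl_append_singleton_eq_map (f := fun kv : Int × Int => (kv.1, kv.2)),
    PySem.Dict.foldl_insert_getD_add_one_eq_counter, List.nil_append, Prod.mk.eta, List.map_id',
    PySem.List.foldl_prod_mk (f := fun (d : PySem.Dict Int Int) (x : Int) => d.insert x (d.getD x 0 + 1))
      (g := fun (m : Int) (x : Int) => if x > m then x else m),
    pvBuyLoopA_eq_greedy, pvOuterB_eq_greedy]
  rw [pvListEq]
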